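-- pv_equiv track=rewrite | github.com/Natesc/DDO-DPS-Calculator | DDO_DPS_Calc.py | findCritical
-- ===== SOURCE A (Python) =====
-- def findCritical(exportData):
--     # Define a list to store dice data for both normal crits and 19-20 crits
--     critDice = []
--     critRange = []
--     for val in exportData:
--         # Parse the data to find the normal critical section
--         if val.split(" ")[0] == "Critical":
--             # Create a list of each dice roll
--             data = [i for i in val.split(" ") if i]
--             # Parse out text that isnt part of a roll.
--             data = [i for i in data if any(c.isdigit() for c in i)]
--             # Append critRange and then remove the first value (the numbers you crit on)
--             critRange.append(data[0])
--             data.pop(0)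
--
--             critDice.append(data)
--
--     critMulti = []
--     for i in critDice:
--         critMulti.append(i[1])
--         i.pop(1)
--
--     return critDice, critMulti, critRange
-- ===== SOURCE B (Python) =====
-- def findCritical(exportData):
--     # Single pass: build all three lists directly, no second loop / in-place pops.
--     critDice = []
--     critMulti = []
--     critRange = []
--     for line in exportData:
--         if line.split(" ")[0] == "Critical":
--             t = [tok for tok in line.split(" ")
--                  if tok and any(c.isdigit() for c in tok)]
--             critRange.append(t[0])
--             critMulti.append(t[2])
--             critDice.append([t[1]] + t[3:])
--     return critDice, critMulti, critRange
-- ===== Notes on version B (the rewrite author's own statement) =====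
-- stated objective: simpler
-- what changed: B builds critDice/critMulti/critRange in one pass, indexing the filtered token list directly ([t[0]], t[2], [t[1]]+t[3:]), instead of A's two loops with destructive pop(0)/pop(1) on the stored lists.
import Mathlib
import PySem

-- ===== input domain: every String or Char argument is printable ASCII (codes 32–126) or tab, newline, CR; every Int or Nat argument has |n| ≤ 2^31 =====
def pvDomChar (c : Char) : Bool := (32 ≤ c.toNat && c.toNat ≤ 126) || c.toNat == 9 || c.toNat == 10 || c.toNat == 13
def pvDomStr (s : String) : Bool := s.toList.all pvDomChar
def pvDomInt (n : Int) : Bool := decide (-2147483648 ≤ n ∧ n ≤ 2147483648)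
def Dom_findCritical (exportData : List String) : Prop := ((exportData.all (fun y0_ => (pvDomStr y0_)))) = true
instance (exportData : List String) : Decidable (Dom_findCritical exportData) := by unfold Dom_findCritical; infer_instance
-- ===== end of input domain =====

-- B is a single pass building all three result lists directly; A makes a second loop over the
-- stored critDice lists, mutating them with pop. Equivalence is about the return value
-- (A mutates only lists it created itself, so no caller-visible side effect differs).

-- ===== PORT A =====
-- val.split(" ")[0] == "Critical"  (split(" ") is never empty, so [0] cannot raise; getD "" is exact)
def pvIsCritLine (val : String) : Bool :=
  ((PySem.List.pyGet? ((PySem.Str.split? val " ").getD []) 0).getD "") == "Critical"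

def pvPass1 (exportData : List String) : List (List String) × List String :=
  exportData.foldl (fun (st : List (List String) × List String) val =>
    if pvIsCritLine val then
      let data := ((PySem.Str.split? val " ").getD []).filter (fun i => i != "")
      let data := data.filter (fun i => i.toList.any PySem.Chars.isdigit)
      -- critRange.append(data[0]); data.pop(0): data is nonempty under Pre_, so
      -- data[0] = (pyGet? data 0).getD "" and pop(0) = drop 1, exactly
      (st.1 ++ [data.drop 1], st.2 ++ [(PySem.List.pyGet? data 0).getD ""])
    else st) ([], [])

-- second loop: critMulti.append(i[1]); i.pop(1)  (i has ≥ 2 entries under Pre_, so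
-- i[1] = (pyGet? i 1).getD "" and pop(1) = take 1 ++ drop 2, exactly)
def pvPass2 (critDice : List (List String)) : List (List String) × List String :=
  critDice.foldl (fun (st : List (List String) × List String) i =>
    (st.1 ++ [i.take 1 ++ i.drop 2], st.2 ++ [(PySem.List.pyGet? i 1).getD ""])) ([], [])

def findCritical (exportData : List String) : List (List String) × List String × List String :=
  let p1 := pvPass1 exportData
  let p2 := pvPass2 p1.1
  (p2.1, p2.2, p1.2)

-- ===== PORT B =====
def pvTokens (line : String) : List String :=
  ((PySem.Str.split? line " ").getD []).filter (fun tok => tok != "" && tok.toList.any PySem.Chars.isdigit)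

def findCritical_alt (exportData : List String) : List (List String) × List String × List String :=
  exportData.foldl (fun (st : List (List String) × List String × List String) line =>
    if pvIsCritLine line then
      let t := pvTokens line
      -- t[0], t[2], t[1], t[3:] all exist / are exact under Pre_ (t has ≥ 3 tokens)
      (st.1 ++ [((PySem.List.pyGet? t 1).getD "") :: PySem.List.slice t (some 3) none],
       st.2.1 ++ [(PySem.List.pyGet? t 2).getD ""],
       st.2.2 ++ [(PySem.List.pyGet? t 0).getD ""])
    else st) ([], [], [])

-- ===== PRECONDITION & SPEC =====
-- Pre_ excludes exactly the inputs on which A raises IndexError: a "Critical" line whose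
-- digit-bearing token list has fewer than 3 entries (data[0] or i[1] then fails).
def Pre_findCritical (exportData : List String) : Prop :=
  ∀ s ∈ exportData, pvIsCritLine s = true → 3 ≤ (pvTokens s).length
instance (exportData : List String) : Decidable (Pre_findCritical exportData) := by
  unfold Pre_findCritical; infer_instance

def pvWitness_findCritical : List String :=
  ["Critical roll: 19-20 2d6 x2", "nothing here", "Critical 15-20 1d8+4 x3 5d10"]

def Spec_findCritical (exportData : List String) (out : List (List String) × List String × List String) : Prop := out = findCritical_alt exportData
instance (exportData : List String) (out : List (List String) × List String × List String) : Decidable (Spec_findCritical exportData out) := by unfold Spec_findCritical; infer_instance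

-- ===== CLAIM (what is proved, stated in full; the proofs are below) =====
def Claim_equal_findCritical : Prop := ∀ (exportData : List String), Dom_findCritical exportData → Pre_findCritical exportData → Spec_findCritical exportData (findCritical exportData)

-- ===== LEMMAS AND PROOFS =====

-- closed form of A's first loop (accumulator generalized)
theorem pv_foldl_pair_if {α β γ : Type} (l : List α) (p : α → Bool) (f : α → β) (g : α → γ)
    (a : List β) (b : List γ) :
    l.foldl (fun st x => if p x then (st.1 ++ [f x], st.2 ++ [g x]) else st) (a, b)
      = (a ++ (l.filter p).map f, b ++ (l.filter p).map g) := by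
  induction l generalizing a b with
  | nil => simp
  | cons x xs ih =>
    by_cases h : p x <;> simp [h, ih]

-- closed form of A's second loop
theorem pv_foldl_pair {α β γ : Type} (l : List α) (f : α → β) (g : α → γ)
    (a : List β) (b : List γ) :
    l.foldl (fun st x => (st.1 ++ [f x], st.2 ++ [g x])) (a, b)
      = (a ++ l.map f, b ++ l.map g) := by
  induction l generalizing a b with
  | nil => simp
  | cons x xs ih => simp [ih]

-- closed form of B's single loop
theorem pv_foldl_triple_if {α β γ δ : Type} (l : List α) (p : α → Bool)
    (f : α → β) (g : α → γ) (h : α → δ) (a : List β) (b : List γ) (c : List δ) :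
    l.foldl (fun st x => if p x then (st.1 ++ [f x], st.2.1 ++ [g x], st.2.2 ++ [h x]) else st) (a, b, c)
      = (a ++ (l.filter p).map f, b ++ (l.filter p).map g, c ++ (l.filter p).map h) := by
  induction l generalizing a b c with
  | nil => simp
  | cons x xs ih =>
    by_cases hp : p x <;> simp [hp, ih]

-- A's two successive filters are B's single filter
theorem pv_filter_filter (l : List String) :
    (l.filter (fun i => i != "")).filter (fun i => i.toList.any PySem.Chars.isdigit)
      = l.filter (fun tok => tok != "" && tok.toList.any PySem.Chars.isdigit) := by
  rw [List.filter_filter]; congr 1; funext a; exact Bool.and_comm _ _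

theorem findCritical_spec' (exportData : List String)
    (hpre : Pre_findCritical exportData) :
    findCritical exportData = findCritical_alt exportData := by
  unfold findCritical findCritical_alt pvPass1 pvPass2
  rw [pv_foldl_pair_if]
  simp only []
  rw [pv_foldl_pair, pv_foldl_triple_if]
  simp only [List.nil_append, List.map_map]
  refine Prod.ext ?_ (Prod.ext ?_ ?_) <;> simp only []
  · -- critDice
    apply List.map_congr_left
    intro s hs
    have hmem := List.mem_filter.mp hs
    have ht : 3 ≤ (pvTokens s).length := hpre s hmem.1 hmem.2
    simp only [pv_filter_filter]
    show ((pvTokens s).drop 1).take 1 ++ ((pvTokens s).drop 1).drop 2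
        = ((PySem.List.pyGet? (pvTokens s) 1).getD "") :: PySem.List.slice (pvTokens s) (some 3) none
    obtain ⟨t0, t1, t2, r, heq⟩ : ∃ t0 t1 t2 r, pvTokens s = t0 :: t1 :: t2 :: r := by
      match h : pvTokens s with
      | [] | [_] | [_, _] => rw [h] at ht; simp at ht
      | t0 :: t1 :: t2 :: r => exact ⟨t0, t1, t2, r, rfl⟩
    rw [heq]
    rw [show ((3 : Int) = ((3 : Nat) : Int)) by norm_num, PySem.List.slice_from_natCast]
    simp [PySem.List.pyGet?, PySem.List.pyIdx?]
    rw [if_pos (by omega)]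
    simp
  · -- critMulti
    apply List.map_congr_left
    intro s hs
    have hmem := List.mem_filter.mp hs
    have ht : 3 ≤ (pvTokens s).length := hpre s hmem.1 hmem.2
    simp only [pv_filter_filter]
    show (PySem.List.pyGet? ((pvTokens s).drop 1) 1).getD ""
        = (PySem.List.pyGet? (pvTokens s) 2).getD ""
    obtain ⟨t0, t1, t2, r, heq⟩ : ∃ t0 t1 t2 r, pvTokens s = t0 :: t1 :: t2 :: r := by
      match h : pvTokens s with
      | [] | [_] | [_, _] => rw [h] at ht; simp at ht
      | t0 :: t1 :: t2 :: r => exact ⟨t0, t1, t2, r, rfl⟩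
    rw [heq]
    simp [PySem.List.pyGet?, PySem.List.pyIdx?]
    rw [if_pos (by omega)]
    simp
  · -- critRange
    apply List.map_congr_left
    intro s _
    rw [pvTokens, pv_filter_filter]

-- ===== VERDICT (by name: the statement is the Claim_ definition above) =====
theorem findCritical_spec : Claim_equal_findCritical := by
  intro exportData _ hpre
  unfold Spec_findCritical
  exact findCritical_spec' exportData hpre
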